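-- pv_equiv track=rewrite | github.com/KangMinHyeok/irredicator | preprocess/spark_extract_bgp_feature.py | bitvector2str
-- ===== SOURCE A (Python) =====
-- def bitvector2str(bitvector, size=32):
--     bstring = ''
--     for record in bitvector:
--         for offset in range(32):
--             mask = 1 << offset
--             if record & mask:
--                 bstring = '1' + bstring
--             else:
--                 bstring = '0' + bstring
--
--     return bstring[32-size:]
-- ===== SOURCE B (Python) =====
-- def bitvector2str(bitvector, size=32):
--     # Build one big integer (last record in the high bits), render it once, then slice.
--     acc = 0
--     for record in reversed(bitvector):
--         acc = (acc << 32) | (record & 0xFFFFFFFF)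
--     s = format(acc, '0{}b'.format(32 * len(bitvector))) if bitvector else ''
--     return s[32 - size:]
-- ===== Notes on version B (the rewrite author's own statement) =====
-- stated objective: faster
-- what changed: Replaces the nested per-bit string-prepending loop with a single integer accumulator (acc = (acc<<32) | (record & 0xFFFFFFFF) over the reversed list) rendered once via format(acc, '0{w}b') and then sliced.
import Mathlib
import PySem

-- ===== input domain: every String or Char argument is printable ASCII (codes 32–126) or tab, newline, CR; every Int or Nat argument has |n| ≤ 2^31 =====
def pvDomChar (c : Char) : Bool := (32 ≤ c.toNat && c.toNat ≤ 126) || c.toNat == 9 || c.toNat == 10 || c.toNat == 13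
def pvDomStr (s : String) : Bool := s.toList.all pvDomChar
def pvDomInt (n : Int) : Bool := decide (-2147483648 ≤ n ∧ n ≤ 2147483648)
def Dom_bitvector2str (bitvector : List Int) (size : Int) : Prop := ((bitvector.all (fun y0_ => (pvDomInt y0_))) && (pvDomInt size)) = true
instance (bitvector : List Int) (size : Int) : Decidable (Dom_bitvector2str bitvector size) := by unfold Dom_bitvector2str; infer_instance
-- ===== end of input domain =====

-- B builds one big integer accumulator and renders the whole bit string once
-- (zero-padded binary of the accumulator) instead of prepending one character per bit
-- in a nested loop; same return value, different algorithm.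


-- ===== PORT A =====
def bitvector2str (bitvector : List Int) (size : Int) : String :=
  let bstring : String := bitvector.foldl (fun (bstring : String) (record : Int) =>
    (List.range 32).foldl (fun (bstring : String) (offset : Nat) =>
      let mask : Int := (1 : Int) <<< offset
      if PySem.Int.band record mask ≠ 0 then "1" ++ bstring else "0" ++ bstring) bstring) ""
  PySem.Str.slice bstring (some (32 - size)) none

-- ===== PORT B =====
def bitvector2str_alt (bitvector : List Int) (size : Int) : String :=
  let acc : Int := bitvector.reverse.foldl
    (fun acc record => PySem.Int.bor (acc <<< (32 : Nat)) (PySem.Int.band record 4294967295)) 0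
  -- format(acc, '0{w}b') for the nonnegative acc built above: format(acc,'b')
  -- (= PySem.Int.toBinChars acc) left-padded with '0' to width w; exact since acc ≥ 0
  let s : String := if bitvector.isEmpty then "" else
    String.ofList (List.replicate (32 * bitvector.length - (PySem.Int.toBinChars acc).length) '0'
      ++ PySem.Int.toBinChars acc)
  PySem.Str.slice s (some (32 - size)) none

-- ===== PRECONDITION & SPEC =====
def Spec_bitvector2str (bitvector : List Int) (size : Int) (out : String) : Prop := out = bitvector2str_alt bitvector size
instance (bitvector : List Int) (size : Int) (out : String) : Decidable (Spec_bitvector2str bitvector size out) := by unfold Spec_bitvector2str; infer_instance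

-- ===== CLAIM (what is proved, stated in full; the proofs are below) =====
def Claim_equal_bitvector2str : Prop := ∀ (bitvector : List Int) (size : Int), Dom_bitvector2str bitvector size → Spec_bitvector2str bitvector size (bitvector2str bitvector size)

-- ===== LEMMAS AND PROOFS =====

/-- Python's `r & 0xFFFFFFFF`, as a natural number. -/
def pvMask32 (r : Int) : Nat := (r % (4294967296 : Int)).toNat

/-- Fixed-width binary rendering (MSB first) of `m` at width `w`. -/
def pvFixW : Nat → Nat → List Char
  | _, 0 => []
  | m, w+1 => pvFixW (m / 2) w ++ [Nat.digitChar (m % 2)]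

/-- The character list A's outer loop produces (last record's bits in front). -/
def pvChars : List Int → List Char
  | [] => []
  | r :: rest => pvChars rest ++ pvFixW (pvMask32 r) 32

/-- B's accumulator, as a natural number. -/
def pvAcc (bv : List Int) : Nat := bv.foldr (fun r a => a * 2 ^ 32 + pvMask32 r) 0

/-- Minimal binary digits, MSB first (`[]` for 0). -/
def pvMSB (a : Nat) : List Char :=
  if a = 0 then [] else pvMSB (a / 2) ++ [Nat.digitChar (a % 2)]
  decreasing_by exact Nat.div_lt_self (Nat.pos_of_ne_zero (by assumption)) (by omega)

theorem pvMask32_lt (r : Int) : pvMask32 r < 2 ^ 32 := by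
  unfold pvMask32
  have h1 : 0 ≤ r % 4294967296 := Int.emod_nonneg r (by norm_num)
  have h2 : r % 4294967296 < 4294967296 := Int.emod_lt_of_pos r (by norm_num)
  omega

theorem pv_band_mask (r : Int) : PySem.Int.band r 4294967295 = ((pvMask32 r : Nat) : Int) := by
  unfold PySem.Int.band pvMask32
  have e : (4294967295 : Int).toNat = 2 ^ 32 - 1 := by rfl
  rcases le_or_gt 0 r with hr | hr
  · rw [if_pos hr, if_pos (by norm_num), e, Nat.and_two_pow_sub_one_eq_mod]
    omega
  · rw [if_neg (by omega), if_pos (by norm_num), e, Nat.and_comm,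
      Nat.and_two_pow_sub_one_eq_mod]
    omega

theorem pv_testBit_compl {n x o : Nat} (hx : x < 2 ^ n) (ho : o < n) :
    (2 ^ n - 1 - x).testBit o = ! x.testBit o := by
  induction o generalizing n x with
  | zero =>
    have hA : 2 ^ n = 2 * 2 ^ (n - 1) := by
      rw [← pow_succ']; congr 1; omega
    rw [Nat.testBit_zero, Nat.testBit_zero]
    rcases Nat.mod_two_eq_zero_or_one x with h | h <;>
      simp [show (2 ^ n - 1 - x) % 2 = 1 - x % 2 by omega, h]
  | succ o ih =>
    have hn : 1 ≤ n := by omega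
    have hA : 2 ^ n = 2 * 2 ^ (n - 1) := by
      rw [← pow_succ']; congr 1; omega
    rw [Nat.testBit_succ, Nat.testBit_succ]
    have hdiv : (2 ^ n - 1 - x) / 2 = 2 ^ (n - 1) - 1 - x / 2 := by omega
    rw [hdiv]
    exact ih (by omega) (by omega)

theorem pv_band_bit (r : Int) (o : Nat) (ho : o < 32) :
    (PySem.Int.band r ((1 : Int) <<< o) ≠ 0) ↔ (pvMask32 r).testBit o = true := by
  have hpow : ((1:Int) <<< o) = ((2 ^ o : Nat) : Int) := by
    rw [show (1:Int) = ((1:Nat):Int) from rfl, ← Int.natCast_shiftLeft]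
    norm_num [Nat.shiftLeft_eq]
  rw [hpow]
  unfold PySem.Int.band pvMask32
  have hp : (0 : Int) ≤ ((2 ^ o : Nat) : Int) := by positivity
  have htn : (((2 ^ o : Nat) : Int)).toNat = 2 ^ o := by simp only [Int.toNat_natCast]
  rcases le_or_gt 0 r with hr | hr
  · rw [if_pos hr, if_pos hp, htn]
    have hm : (r % 4294967296).toNat = r.toNat % 2 ^ 32 := by omega
    rw [hm, Nat.testBit_mod_two_pow, Nat.and_two_pow]
    rcases Bool.eq_false_or_eq_true (r.toNat.testBit o) with h | h <;> simp [h, ho]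
  · rw [if_neg (by omega), if_pos hp, htn]
    set s := (-r - 1).toNat with hs
    have hm : (r % 4294967296).toNat = 2 ^ 32 - 1 - s % 2 ^ 32 := by omega
    rw [hm, pv_testBit_compl (Nat.mod_lt _ (by norm_num)) ho,
      Nat.testBit_mod_two_pow, Nat.and_comm, Nat.and_two_pow]
    rcases Bool.eq_false_or_eq_true (s.testBit o) with h | h <;> simp [h, ho]

theorem pv_fixW_map (w : Nat) : ∀ m, pvFixW m w =
    ((List.range w).map (fun o => Nat.digitChar (m / 2 ^ o % 2))).reverse := by
  induction w with
  | zero => intro m; simp [pvFixW]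
  | succ w ih =>
    intro m
    rw [List.range_succ_eq_map]
    simp only [pvFixW, ih (m / 2), List.map_cons, List.map_map, List.reverse_cons]
    congr 1
    · congr 1
      apply List.map_congr_left
      intro o _
      simp only [Function.comp_apply, Nat.succ_eq_add_one]
      congr 2
      rw [Nat.div_div_eq_div_mul, pow_succ']
    · simp

theorem pv_inner (r : Int) (bs : String) :
    ((List.range 32).foldl (fun (bstring : String) (offset : Nat) =>
      let mask : Int := (1 : Int) <<< offset
      if PySem.Int.band r mask ≠ 0 then "1" ++ bstring else "0" ++ bstring) bs).toList
    = pvFixW (pvMask32 r) 32 ++ bs.toList := by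
  have step : ∀ (l : List Nat) (bs : String),
      (l.foldl (fun (bstring : String) (offset : Nat) =>
        let mask : Int := (1 : Int) <<< offset
        if PySem.Int.band r mask ≠ 0 then "1" ++ bstring else "0" ++ bstring) bs).toList
      = (l.map (fun (o : Nat) => if PySem.Int.band r ((1 : Int) <<< o) ≠ 0 then '1' else '0')).reverse
        ++ bs.toList := by
    intro l
    induction l with
    | nil => intro bs; simp
    | cons o l ih =>
      intro bs
      simp only [List.foldl_cons, ih, List.map_cons, List.reverse_cons, List.append_assoc]
      congr 1
      split <;> simp
  rw [step, pv_fixW_map]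
  have hmap : (List.range 32).map (fun (o : Nat) => if PySem.Int.band r ((1 : Int) <<< o) ≠ 0 then '1' else '0')
      = (List.range 32).map (fun o => Nat.digitChar (pvMask32 r / 2 ^ o % 2)) := by
    apply List.map_congr_left
    intro o ho'
    rw [List.mem_range] at ho'
    rcases Bool.eq_false_or_eq_true ((pvMask32 r).testBit o) with h | h
    · have ho1 : pvMask32 r / 2 ^ o % 2 = 1 := by
        have h' := h
        rw [Nat.testBit_eq_decide_div_mod_eq] at h'
        simpa using h'
      rw [if_pos ((pv_band_bit r o ho').mpr h), ho1]
      rfl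
    · have hz : pvMask32 r / 2 ^ o % 2 = 0 := by
        have h' := h
        rw [Nat.testBit_eq_decide_div_mod_eq] at h'
        simp only [decide_eq_false_iff_not] at h'
        omega
      have hb : ¬ (PySem.Int.band r ((1 : Int) <<< o) ≠ 0) := by
        intro hc
        rw [pv_band_bit r o ho'] at hc
        simp [h] at hc
      rw [if_neg hb, hz]
      rfl
  rw [hmap]

theorem pv_outer (bv : List Int) : ∀ bs : String,
    (bv.foldl (fun (bstring : String) (record : Int) =>
      (List.range 32).foldl (fun (bstring : String) (offset : Nat) =>
        let mask : Int := (1 : Int) <<< offset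
        if PySem.Int.band record mask ≠ 0 then "1" ++ bstring else "0" ++ bstring) bstring) bs).toList
    = pvChars bv ++ bs.toList := by
  induction bv with
  | nil => intro bs; simp [pvChars]
  | cons r rest ih =>
    intro bs
    simp only [List.foldl_cons, ih, pvChars, List.append_assoc]
    rw [pv_inner]

theorem pv_acc_eq (bv : List Int) :
    bv.reverse.foldl
      (fun acc record => PySem.Int.bor (acc <<< (32 : Nat)) (PySem.Int.band record 4294967295)) 0
    = ((pvAcc bv : Nat) : Int) := by
  rw [List.foldl_reverse]
  induction bv with
  | nil => simp [pvAcc]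
  | cons r rest ih =>
    rw [List.foldr_cons, ih, pv_band_mask,
      show pvAcc (r :: rest) = pvAcc rest * 2 ^ 32 + pvMask32 r from rfl,
      show ((pvAcc rest : Nat) : Int) <<< (32 : Nat) = (((pvAcc rest) <<< 32 : Nat) : Int) from
        (Int.natCast_shiftLeft _ _).symm,
      PySem.Int.bor_natCast]
    congr 1
    have h := pvMask32_lt r
    apply Nat.eq_of_testBit_eq
    intro i
    rw [Nat.shiftLeft_eq, mul_comm (pvAcc rest),
      Nat.testBit_two_pow_mul_add (pvAcc rest) h, Nat.testBit_lor, mul_comm,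
      ← Nat.shiftLeft_eq]
    by_cases hi : i < 32
    · simp [hi, Nat.testBit_shiftLeft, Nat.not_le.mpr hi]
    · simp [hi, Nat.testBit_shiftLeft, Nat.le_of_not_lt hi,
        Nat.testBit_lt_two_pow (lt_of_lt_of_le h (Nat.pow_le_pow_right (by norm_num) (Nat.le_of_not_lt hi)))]

theorem pv_acc_lt (bv : List Int) : pvAcc bv < 2 ^ (32 * bv.length) := by
  induction bv with
  | nil => simp [pvAcc]
  | cons r rest ih =>
    have h := pvMask32_lt r
    have hlen : 32 * (r :: rest).length = 32 * rest.length + 32 := by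
      simp [List.length_cons]; ring
    rw [show pvAcc (r :: rest) = pvAcc rest * 2 ^ 32 + pvMask32 r from rfl, hlen, pow_add]
    have h1 : pvAcc rest * 2 ^ 32 ≤ (2 ^ (32 * rest.length) - 1) * 2 ^ 32 :=
      Nat.mul_le_mul_right _ (by omega)
    have h2 : (2 ^ (32 * rest.length) - 1) * 2 ^ 32 = 2 ^ (32 * rest.length) * 2 ^ 32 - 1 * 2 ^ 32 :=
      Nat.sub_mul _ _ _
    have h3 : 2 ^ 32 ≤ 2 ^ (32 * rest.length) * 2 ^ 32 :=
      Nat.le_mul_of_pos_left _ (by positivity)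
    omega

theorem pv_fixW_split (k : Nat) : ∀ (b a w : Nat), b < 2 ^ k →
    pvFixW (a * 2 ^ k + b) (w + k) = pvFixW a w ++ pvFixW b k := by
  induction k with
  | zero =>
    intro b a w hb
    interval_cases b
    simp [pvFixW]
  | succ k ih =>
    intro b a w hb
    have hA : 2 ^ (k + 1) = 2 * 2 ^ k := by rw [pow_succ']
    have hdiv : (a * 2 ^ (k + 1) + b) / 2 = a * 2 ^ k + b / 2 := by
      rw [hA, ← mul_assoc, mul_comm a 2, mul_assoc]
      omega
    have hmod : (a * 2 ^ (k + 1) + b) % 2 = b % 2 := by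
      rw [hA, ← mul_assoc, mul_comm a 2, mul_assoc]
      omega
    rw [show pvFixW (a * 2 ^ (k + 1) + b) (w + (k + 1)) =
        pvFixW ((a * 2 ^ (k + 1) + b) / 2) (w + k) ++ [Nat.digitChar ((a * 2 ^ (k + 1) + b) % 2)]
        from rfl,
      hdiv, hmod, ih (b / 2) a w (by omega),
      show pvFixW b (k + 1) = pvFixW (b / 2) k ++ [Nat.digitChar (b % 2)] from rfl,
      List.append_assoc]

theorem pv_chars_eq (bv : List Int) : pvChars bv = pvFixW (pvAcc bv) (32 * bv.length) := by
  induction bv with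
  | nil => simp [pvChars, pvAcc, pvFixW]
  | cons r rest ih =>
    simp only [pvChars, pvAcc, List.foldr_cons, List.length_cons]
    have h1 : 32 * (rest.length + 1) = 32 * rest.length + 32 := by ring
    rw [h1, pv_fixW_split 32 (pvMask32 r) _ _ (pvMask32_lt r), ih]
    rfl

theorem pv_fixW_zero (w : Nat) : pvFixW 0 w = List.replicate w '0' := by
  induction w with
  | zero => simp [pvFixW]
  | succ w ih => rw [List.replicate_succ']; simp [pvFixW, ih, Nat.digitChar]

theorem pvMSB_zero : pvMSB 0 = [] := by rw [pvMSB]; simp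

theorem pvMSB_one : pvMSB 1 = ['1'] := by
  rw [pvMSB]
  simp [pvMSB_zero, Nat.digitChar]

theorem pv_toDigitsCore_eq (f : Nat) : ∀ (a : Nat) (l : List Char), a < f →
    Nat.toDigitsCore 2 f a l = (if a = 0 then ['0'] else pvMSB a) ++ l := by
  induction f with
  | zero => intro a l h; omega
  | succ f ih =>
    intro a l h
    rw [Nat.toDigitsCore]
    by_cases h2 : a / 2 = 0
    · rw [if_pos h2]
      rcases (by omega : a = 0 ∨ a = 1) with rfl | rfl
      · simp [Nat.digitChar]
      · simp [pvMSB_one, Nat.digitChar]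
    · rw [if_neg h2, ih (a / 2) _ (by omega), if_neg h2,
        if_neg (show ¬ a = 0 by omega)]
      conv_rhs => rw [pvMSB]
      rw [if_neg (show ¬ a = 0 by omega)]
      simp

theorem pv_toDigits_eq (a : Nat) :
    Nat.toDigits 2 a = (if a = 0 then ['0'] else pvMSB a) ++ [] := by
  exact pv_toDigitsCore_eq (a + 1) a [] (by omega)

theorem pv_pad (w : Nat) : ∀ a : Nat, 0 < w → a < 2 ^ w →
    List.replicate (w - (Nat.toDigits 2 a).length) '0' ++ Nat.toDigits 2 a = pvFixW a w := by
  induction w with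
  | zero => intro a h; omega
  | succ w ih =>
    intro a _ ha
    by_cases h1 : a ≤ 1
    · have hd : Nat.toDigits 2 a = [Nat.digitChar a] := by
        rcases (by omega : a = 0 ∨ a = 1) with rfl | rfl
        · rw [pv_toDigits_eq]; simp [Nat.digitChar]
        · rw [pv_toDigits_eq]; simp [pvMSB_one, Nat.digitChar]
      have hfix : pvFixW a (w + 1) = List.replicate w '0' ++ [Nat.digitChar a] := by
        rw [show pvFixW a (w + 1) = pvFixW (a / 2) w ++ [Nat.digitChar (a % 2)] from rfl,
          show a / 2 = 0 by omega, show a % 2 = a by omega, pv_fixW_zero]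
      rw [hd, hfix]
      simp
    · -- a ≥ 2
      have hmsb : Nat.toDigits 2 a = Nat.toDigits 2 (a / 2) ++ [Nat.digitChar (a % 2)] := by
        rw [pv_toDigits_eq, pv_toDigits_eq, if_neg (show ¬ a = 0 by omega),
          if_neg (show ¬ a / 2 = 0 by omega)]
        conv_lhs => rw [pvMSB]
        rw [if_neg (show ¬ a = 0 by omega)]
        simp
      have hlen : (Nat.toDigits 2 a).length = (Nat.toDigits 2 (a / 2)).length + 1 := by
        rw [hmsb]; simp
      have hw : 0 < w := by
        by_contra hw
        have hw0 : w = 0 := by omega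
        subst hw0
        have ha2 : a < 2 := by simpa using ha
        omega
      rw [hlen, hmsb]
      have e1 : w + 1 - ((Nat.toDigits 2 (a / 2)).length + 1)
          = w - (Nat.toDigits 2 (a / 2)).length := by omega
      rw [e1, ← List.append_assoc, ih (a / 2) hw (by omega),
        show pvFixW a (w + 1) = pvFixW (a / 2) w ++ [Nat.digitChar (a % 2)] from rfl]

theorem pv_strings_eq (bv : List Int) :
    (bv.foldl (fun (bstring : String) (record : Int) =>
      (List.range 32).foldl (fun (bstring : String) (offset : Nat) =>
        let mask : Int := (1 : Int) <<< offset
        if PySem.Int.band record mask ≠ 0 then "1" ++ bstring else "0" ++ bstring) bstring) "")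
    = (if bv.isEmpty then "" else
        String.ofList (List.replicate (32 * bv.length -
          (PySem.Int.toBinChars (bv.reverse.foldl
            (fun acc record => PySem.Int.bor (acc <<< (32 : Nat)) (PySem.Int.band record 4294967295)) 0)).length) '0'
          ++ PySem.Int.toBinChars (bv.reverse.foldl
            (fun acc record => PySem.Int.bor (acc <<< (32 : Nat)) (PySem.Int.band record 4294967295)) 0))) := by
  rw [← String.toList_inj]
  have hA : _ = pvChars bv ++ ("" : String).toList := pv_outer bv ""
  rw [hA]
  simp only [pv_acc_eq]
  cases bv with
  | nil => simp [pvChars]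
  | cons r rest =>
    rw [if_neg (by simp)]
    have hbin : PySem.Int.toBinChars ((pvAcc (r :: rest) : Nat) : Int)
        = Nat.toDigits 2 (pvAcc (r :: rest)) := by
      unfold PySem.Int.toBinChars
      rw [if_neg (not_lt.mpr (Int.natCast_nonneg _))]
      simp
    simp only [hbin]
    rw [pv_chars_eq]
    have hlt := pv_acc_lt (r :: rest)
    have hpos : 0 < 32 * (r :: rest).length := by simp
    rw [← pv_pad (32 * (r :: rest).length) (pvAcc (r :: rest)) hpos hlt]
    simp [String.toList_ofList]

-- ===== VERDICT (by name: the statement is the Claim_ definition above) =====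
theorem bitvector2str_spec : Claim_equal_bitvector2str := by
  intro bv size _
  unfold Spec_bitvector2str bitvector2str bitvector2str_alt
  simp only []
  rw [pv_strings_eq]
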